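-- pv_equiv track=rewrite | github.com/Amrtamer711/ironforge | src/sales-module/core/utils/location_matcher.py | match_location_key
-- ===== SOURCE A (Python) =====
-- from typing import Any
--
-- def match_location_key(
--     location_input: str,
--     available_locations: list[dict[str, Any]],
-- ) -> str | None:
--     """
--     Match a location input (display name or partial match) to its canonical location_key.
--
--     Matching strategy:
--     1. Exact location_key match
--     2. Exact display_name match (case-insensitive)
--     3. Fuzzy substring matching (legacy compatibility)
--
--     Args:
--         location_input: User-provided location string (can be display name, partial name, or key)
--         available_locations: List of location dicts from database/Asset-Management.
--                            Each dict should have: location_key, display_name (optional)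
--
--     Returns:
--         Canonical location_key if found, None otherwise
--
--     Examples:
--         >>> locations = [
--         ...     {"location_key": "dubai_gateway", "display_name": "The Gateway"},
--         ...     {"location_key": "dubai_jawhara", "display_name": "Jawhara Mall"}
--         ... ]
--         >>> match_location_key("The Gateway", locations)
--         'dubai_gateway'
--         >>> match_location_key("gateway", locations)
--         'dubai_gateway'
--         >>> match_location_key("nonexistent", locations)
--         None
--     """
--     if not location_input or not available_locations:
--         return None
--
--     location_normalized = location_input.strip().lower()
--
--     # Strategy 1: Exact location_key match
--     for loc in available_locations:
--         key = loc.get("location_key", "")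
--         if key.lower() == location_normalized:
--             return key
--
--     # Strategy 2: Exact display_name match (case-insensitive)
--     for loc in available_locations:
--         display_name = loc.get("display_name", "")
--         if display_name and display_name.lower() == location_normalized:
--             return loc.get("location_key")
--
--     # Strategy 3: Fuzzy substring matching (legacy compatibility)
--     # Check if input is substring of key or display_name
--     for loc in available_locations:
--         key = loc.get("location_key", "").lower()
--         display_name = loc.get("display_name", "").lower()
--
--         # Check if input matches key
--         if key and (location_normalized in key or key in location_normalized):
--             return loc.get("location_key")
--
--         # Check if input matches display name
--         if display_name and (location_normalized in display_name or display_name in location_normalized):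
--             return loc.get("location_key")
--
--     return None
-- ===== SOURCE B (Python) =====
-- def match_location_key(location_input, available_locations):
--     """Single pass: early-return on an exact-key hit; otherwise remember the
--     first exact-display-name hit and the first fuzzy hit, decide at the end."""
--     if not location_input or not available_locations:
--         return None
--     norm = location_input.strip().lower()
--     found_exact = found_fuzzy = False
--     val_exact = val_fuzzy = None
--     for loc in available_locations:
--         key = loc.get("location_key", "")
--         if key.lower() == norm:
--             return key
--         if not found_exact:
--             dn = loc.get("display_name", "")
--             if dn and dn.lower() == norm:
--                 found_exact, val_exact = True, loc.get("location_key")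
--         if not found_fuzzy:
--             k = key.lower()
--             dn_l = loc.get("display_name", "").lower()
--             if (k and (norm in k or k in norm)) or (dn_l and (norm in dn_l or dn_l in norm)):
--                 found_fuzzy, val_fuzzy = True, loc.get("location_key")
--     if found_exact:
--         return val_exact
--     if found_fuzzy:
--         return val_fuzzy
--     return None
-- ===== Notes on version B (the rewrite author's own statement) =====
-- stated objective: alternative
-- what changed: A makes three sequential full scans (exact key, exact display name, fuzzy substring); B makes a single pass that early-returns on an exact-key hit and otherwise records the first exact-display-name hit and the first fuzzy hit, deciding by priority at the end.
import Mathlib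
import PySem

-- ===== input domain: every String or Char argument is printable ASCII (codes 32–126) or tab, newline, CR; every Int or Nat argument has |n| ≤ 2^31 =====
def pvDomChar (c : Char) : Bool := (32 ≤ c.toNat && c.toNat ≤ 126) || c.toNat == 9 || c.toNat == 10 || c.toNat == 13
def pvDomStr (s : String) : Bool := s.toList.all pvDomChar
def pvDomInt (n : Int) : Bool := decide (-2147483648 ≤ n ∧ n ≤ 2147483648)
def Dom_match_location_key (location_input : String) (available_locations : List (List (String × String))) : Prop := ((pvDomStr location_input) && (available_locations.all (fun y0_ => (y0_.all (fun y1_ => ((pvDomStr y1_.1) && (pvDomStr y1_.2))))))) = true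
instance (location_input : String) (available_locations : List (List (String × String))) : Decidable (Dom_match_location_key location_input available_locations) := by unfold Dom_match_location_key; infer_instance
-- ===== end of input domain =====

-- B replaces A's three sequential scans by a single pass that early-returns on an
-- exact-key hit and remembers the first exact-display-name and first fuzzy hits
-- (objective: alternative decomposition, one traversal instead of three).


-- ===== PORT A =====
-- loc.get(k, default) / loc.get(k) on an association list (first match), used by both ports
def pyGetSD (loc : List (String × String)) (k d : String) : String :=
  ((loc.find? (fun p => p.1 == k)).map Prod.snd).getD d

def pyGetS? (loc : List (String × String)) (k : String) : Option String :=
  (loc.find? (fun p => p.1 == k)).map Prod.snd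

-- Strategy 1 loop: exact location_key match, returns the key itself
def aScan1 (norm : String) : List (List (String × String)) → Option String
  | [] => none
  | loc :: rest =>
    let key := pyGetSD loc "location_key" ""
    if PySem.Str.lower key == norm then some key else aScan1 norm rest

-- Strategy 2 loop: exact display_name match; `some v` = loop returned v (v may be none)
def aScan2 (norm : String) : List (List (String × String)) → Option (Option String)
  | [] => none
  | loc :: rest =>
    let dn := pyGetSD loc "display_name" ""
    if dn != "" && PySem.Str.lower dn == norm then some (pyGetS? loc "location_key")
    else aScan2 norm rest

-- Strategy 3 loop: fuzzy substring match, key check first then display_name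
def aScan3 (norm : String) : List (List (String × String)) → Option (Option String)
  | [] => none
  | loc :: rest =>
    let key := PySem.Str.lower (pyGetSD loc "location_key" "")
    let dn := PySem.Str.lower (pyGetSD loc "display_name" "")
    if key != "" && (PySem.Str.isIn norm key || PySem.Str.isIn key norm) then
      some (pyGetS? loc "location_key")
    else if dn != "" && (PySem.Str.isIn norm dn || PySem.Str.isIn dn norm) then
      some (pyGetS? loc "location_key")
    else aScan3 norm rest

def match_location_key (location_input : String) (available_locations : List (List (String × String))) : Option String :=
  if location_input == "" || available_locations.isEmpty then none
  else
    match aScan1 (PySem.Str.lower (PySem.Str.strip location_input)) available_locations with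
    | some k => some k
    | none =>
      match aScan2 (PySem.Str.lower (PySem.Str.strip location_input)) available_locations with
      | some v => v
      | none =>
        match aScan3 (PySem.Str.lower (PySem.Str.strip location_input)) available_locations with
        | some v => v
        | none => none

-- ===== PORT B =====
-- One pass; f2/f3 hold the first exact-display-name / first fuzzy hit seen so far
def bLoop (norm : String) : List (List (String × String)) → Option (Option String) → Option (Option String) → Option String
  | [], f2, f3 =>
    match f2 with
    | some v => v
    | none => match f3 with | some v => v | none => none
  | loc :: rest, f2, f3 =>
    let key := pyGetSD loc "location_key" ""
    if PySem.Str.lower key == norm then some key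
    else
      let f2' :=
        match f2 with
        | some _ => f2
        | none =>
          let dn := pyGetSD loc "display_name" ""
          if dn != "" && PySem.Str.lower dn == norm then some (pyGetS? loc "location_key") else none
      let f3' :=
        match f3 with
        | some _ => f3
        | none =>
          let k := PySem.Str.lower key
          let dnl := PySem.Str.lower (pyGetSD loc "display_name" "")
          if (k != "" && (PySem.Str.isIn norm k || PySem.Str.isIn k norm))
              || (dnl != "" && (PySem.Str.isIn norm dnl || PySem.Str.isIn dnl norm)) then
            some (pyGetS? loc "location_key")
          else none
      bLoop norm rest f2' f3'

def match_location_key_alt (location_input : String) (available_locations : List (List (String × String))) : Option String :=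
  if location_input == "" || available_locations.isEmpty then none
  else bLoop (PySem.Str.lower (PySem.Str.strip location_input)) available_locations none none

-- ===== PRECONDITION & SPEC =====
def Spec_match_location_key (location_input : String) (available_locations : List (List (String × String))) (out : Option String) : Prop := out = match_location_key_alt location_input available_locations
instance (location_input : String) (available_locations : List (List (String × String))) (out : Option String) : Decidable (Spec_match_location_key location_input available_locations out) := by unfold Spec_match_location_key; infer_instance

-- ===== CLAIM (what is proved, stated in full; the proofs are below) =====
def Claim_equal_match_location_key : Prop := ∀ (location_input : String) (available_locations : List (List (String × String))), Dom_match_location_key location_input available_locations → Spec_match_location_key location_input available_locations (match_location_key location_input available_locations)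

-- ===== LEMMAS AND PROOFS =====
-- how B's tail decides once the list is exhausted
def pvFirst (a b : Option (Option String)) : Option (Option String) :=
  match a with | some _ => a | none => b

def pvFinish (f2 f3 : Option (Option String)) : Option String :=
  match f2 with
  | some v => v
  | none => match f3 with | some v => v | none => none

lemma pvFirst_assoc (f hit tail : Option (Option String)) :
    pvFirst (pvFirst f hit) tail = pvFirst f (pvFirst hit tail) := by
  cases f <;> cases hit <;> rfl

lemma aScan2_cons (norm : String) (loc : List (String × String)) (rest : List (List (String × String))) :
    aScan2 norm (loc :: rest) =
      pvFirst (if (pyGetSD loc "display_name" "" != "" && PySem.Str.lower (pyGetSD loc "display_name" "") == norm)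
               then some (pyGetS? loc "location_key") else none)
        (aScan2 norm rest) := by
  simp only [aScan2]
  split <;> rfl

lemma aScan3_cons (norm : String) (loc : List (String × String)) (rest : List (List (String × String))) :
    aScan3 norm (loc :: rest) =
      pvFirst (if ((PySem.Str.lower (pyGetSD loc "location_key" "") != ""
                    && (PySem.Str.isIn norm (PySem.Str.lower (pyGetSD loc "location_key" ""))
                        || PySem.Str.isIn (PySem.Str.lower (pyGetSD loc "location_key" "")) norm))
                   || (PySem.Str.lower (pyGetSD loc "display_name" "") != ""
                    && (PySem.Str.isIn norm (PySem.Str.lower (pyGetSD loc "display_name" ""))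
                        || PySem.Str.isIn (PySem.Str.lower (pyGetSD loc "display_name" "")) norm)))
               then some (pyGetS? loc "location_key") else none)
        (aScan3 norm rest) := by
  simp only [aScan3]
  by_cases h1 : (PySem.Str.lower (pyGetSD loc "location_key" "") != ""
      && (PySem.Str.isIn norm (PySem.Str.lower (pyGetSD loc "location_key" ""))
          || PySem.Str.isIn (PySem.Str.lower (pyGetSD loc "location_key" "")) norm)) = true
  · simp only [h1, if_true, Bool.true_or]; rfl
  · simp only [Bool.not_eq_true] at h1
    simp only [h1, Bool.false_eq_true, if_false, Bool.false_or]
    split <;> rfl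

lemma bLoop_eq (norm : String) (l : List (List (String × String)))
    (f2 f3 : Option (Option String)) :
    bLoop norm l f2 f3 =
      match aScan1 norm l with
      | some k => some k
      | none => pvFinish (pvFirst f2 (aScan2 norm l)) (pvFirst f3 (aScan3 norm l)) := by
  induction l generalizing f2 f3 with
  | nil =>
    cases f2 <;> cases f3 <;>
      simp [bLoop, aScan1, aScan2, aScan3, pvFirst, pvFinish]
  | cons loc rest ih =>
    by_cases hk : (PySem.Str.lower (pyGetSD loc "location_key" "") == norm) = true
    · simp [bLoop, aScan1, hk]
    · have ha1 : aScan1 norm (loc :: rest) = aScan1 norm rest := by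
        simp [aScan1, hk]
      have hb : bLoop norm (loc :: rest) f2 f3 =
          bLoop norm rest
            (pvFirst f2 (if (pyGetSD loc "display_name" "" != ""
                 && PySem.Str.lower (pyGetSD loc "display_name" "") == norm)
                 then some (pyGetS? loc "location_key") else none))
            (pvFirst f3 (if ((PySem.Str.lower (pyGetSD loc "location_key" "") != ""
                    && (PySem.Str.isIn norm (PySem.Str.lower (pyGetSD loc "location_key" ""))
                        || PySem.Str.isIn (PySem.Str.lower (pyGetSD loc "location_key" "")) norm))
                   || (PySem.Str.lower (pyGetSD loc "display_name" "") != ""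
                    && (PySem.Str.isIn norm (PySem.Str.lower (pyGetSD loc "display_name" "")) 
                        || PySem.Str.isIn (PySem.Str.lower (pyGetSD loc "display_name" "")) norm)))
                 then some (pyGetS? loc "location_key") else none)) := by
        simp only [bLoop, hk, Bool.false_eq_true, if_false]
        cases f2 <;> cases f3 <;> rfl
      rw [hb, ih, ha1, aScan2_cons, aScan3_cons, pvFirst_assoc, pvFirst_assoc]

-- ===== VERDICT (by name: the statement is the Claim_ definition above) =====
theorem match_location_key_spec : Claim_equal_match_location_key := by
  intro location_input available_locations _
  unfold Spec_match_location_key match_location_key match_location_key_alt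
  split
  · rfl
  · rw [bLoop_eq]
    cases aScan1 (PySem.Str.lower (PySem.Str.strip location_input)) available_locations with
    | some k => rfl
    | none =>
      cases aScan2 (PySem.Str.lower (PySem.Str.strip location_input)) available_locations <;>
        cases aScan3 (PySem.Str.lower (PySem.Str.strip location_input)) available_locations <;>
        rfl
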